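-- pv_equiv track=rewrite | github.com/ianpcook/fishfry | fishfry.py | filter_venues
-- ===== SOURCE A (Python) =====
-- def filter_venues(venues: list[dict],
--                   pierogies: bool = False,
--                   accessible: bool = False,
--                   alcohol: bool = False,
--                   takeout: bool = False) -> list[dict]:
--     """Filter venues by features."""
--     filtered = venues
--
--     if pierogies:
--         filtered = [v for v in filtered if v.get("homemade_pierogies") == True]
--     if accessible:
--         filtered = [v for v in filtered if v.get("handicap") == True]
--     if alcohol:
--         filtered = [v for v in filtered if v.get("alcohol") == True]
--     if takeout:
--         filtered = [v for v in filtered if v.get("take_out") == True]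
--
--     return filtered
-- ===== SOURCE B (Python) =====
-- def filter_venues(venues: list[dict],
--                   pierogies: bool = False,
--                   accessible: bool = False,
--                   alcohol: bool = False,
--                   takeout: bool = False) -> list[dict]:
--     """Filter venues by features."""
--     active_keys = []
--     if pierogies:
--         active_keys.append("homemade_pierogies")
--     if accessible:
--         active_keys.append("handicap")
--     if alcohol:
--         active_keys.append("alcohol")
--     if takeout:
--         active_keys.append("take_out")
--     return [v for v in venues if all(v.get(k) == True for k in active_keys)]
-- ===== Notes on version B (the rewrite author's own statement) =====
-- stated objective: simpler
-- what changed: B collects the active feature keys once and filters the venues in a single pass with a compound all-keys predicate, instead of A's up-to-four sequential filtering passes that each rebuild the list.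
import Mathlib
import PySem

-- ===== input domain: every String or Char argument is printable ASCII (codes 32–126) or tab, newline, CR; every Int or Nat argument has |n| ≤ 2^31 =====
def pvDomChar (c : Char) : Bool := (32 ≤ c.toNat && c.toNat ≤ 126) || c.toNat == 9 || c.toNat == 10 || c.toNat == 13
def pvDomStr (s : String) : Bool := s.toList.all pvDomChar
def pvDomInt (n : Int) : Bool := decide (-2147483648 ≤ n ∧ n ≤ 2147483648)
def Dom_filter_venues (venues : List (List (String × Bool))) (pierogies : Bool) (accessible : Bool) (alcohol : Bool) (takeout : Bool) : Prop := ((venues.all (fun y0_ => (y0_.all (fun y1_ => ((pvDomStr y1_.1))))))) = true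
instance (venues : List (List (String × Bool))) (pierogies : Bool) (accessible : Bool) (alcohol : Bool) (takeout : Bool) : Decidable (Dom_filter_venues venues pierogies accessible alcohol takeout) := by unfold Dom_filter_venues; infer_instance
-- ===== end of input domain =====

-- B collects the active feature keys once and filters in a single pass; A runs up to four sequential filter passes.
-- ===== PORT A =====
-- v.get(key) == True : first-match lookup in the association list, compared to True
def pvGet (v : List (String × Bool)) (k : String) : Option Bool :=
  (v.find? (fun p => p.1 == k)).map (fun p => p.2)

def filter_venues (venues : List (List (String × Bool))) (pierogies : Bool) (accessible : Bool) (alcohol : Bool) (takeout : Bool) : List (List (String × Bool)) :=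
  let filtered := venues
  let filtered := if pierogies then filtered.filter (fun v => pvGet v "homemade_pierogies" == some true) else filtered
  let filtered := if accessible then filtered.filter (fun v => pvGet v "handicap" == some true) else filtered
  let filtered := if alcohol then filtered.filter (fun v => pvGet v "alcohol" == some true) else filtered
  let filtered := if takeout then filtered.filter (fun v => pvGet v "take_out" == some true) else filtered
  filtered

-- ===== PORT B =====
def filter_venues_alt (venues : List (List (String × Bool))) (pierogies : Bool) (accessible : Bool) (alcohol : Bool) (takeout : Bool) : List (List (String × Bool)) :=
  let activeKeys : List String := []
  let activeKeys := if pierogies then activeKeys ++ ["homemade_pierogies"] else activeKeys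
  let activeKeys := if accessible then activeKeys ++ ["handicap"] else activeKeys
  let activeKeys := if alcohol then activeKeys ++ ["alcohol"] else activeKeys
  let activeKeys := if takeout then activeKeys ++ ["take_out"] else activeKeys
  venues.filter (fun v => activeKeys.all (fun k => pvGet v k == some true))

-- ===== PRECONDITION & SPEC =====
def Spec_filter_venues (venues : List (List (String × Bool))) (pierogies : Bool) (accessible : Bool) (alcohol : Bool) (takeout : Bool) (out : List (List (String × Bool))) : Prop := out = filter_venues_alt venues pierogies accessible alcohol takeout
instance (venues : List (List (String × Bool))) (pierogies : Bool) (accessible : Bool) (alcohol : Bool) (takeout : Bool) (out : List (List (String × Bool))) : Decidable (Spec_filter_venues venues pierogies accessible alcohol takeout out) := by unfold Spec_filter_venues; infer_instance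

-- ===== CLAIM (what is proved, stated in full; the proofs are below) =====
def Claim_equal_filter_venues : Prop := ∀ (venues : List (List (String × Bool))) (pierogies : Bool) (accessible : Bool) (alcohol : Bool) (takeout : Bool), Dom_filter_venues venues pierogies accessible alcohol takeout → Spec_filter_venues venues pierogies accessible alcohol takeout (filter_venues venues pierogies accessible alcohol takeout)

-- ===== LEMMAS AND PROOFS =====

-- ===== VERDICT =====
theorem filter_venues_spec : Claim_equal_filter_venues := by
  intro venues pierogies accessible alcohol takeout _
  unfold Spec_filter_venues filter_venues filter_venues_alt
  cases pierogies <;> cases accessible <;> cases alcohol <;> cases takeout <;>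
    simp [List.filter_filter, Bool.and_comm, Bool.and_left_comm]
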